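-- pv_equiv track=rewrite | github.com/Aliusblack2000/Phyton-course | ex.8.6.py | most_pos
-- ===== SOURCE A (Python) =====
-- def most_pos(mat):
--     big = 0
--     i_max = 0
--     for r in range(len(mat)):
--         counter = 0
--         for c in mat[r]:
--             if c > 0:
--                 counter += 1
--         if counter > i_max:
--             i_max = counter
--             big = r
--     return big
-- ===== SOURCE B (Python) =====
-- def most_pos(mat):
--     if not mat:
--         return 0
--     order = sorted(range(len(mat)), key=lambda r: -sum(1 for x in mat[r] if x > 0))
--     return order[0]
-- ===== Notes on version B (the rewrite author's own statement) =====
-- stated objective: alternative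
-- what changed: Replaced A's single-pass running-max tracker by a stable sort of the row indices on descending positive-count and taking the first index of the sorted order (stability reproduces A's first-max tie-break), with a guard returning 0 for an empty matrix.
import Mathlib
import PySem

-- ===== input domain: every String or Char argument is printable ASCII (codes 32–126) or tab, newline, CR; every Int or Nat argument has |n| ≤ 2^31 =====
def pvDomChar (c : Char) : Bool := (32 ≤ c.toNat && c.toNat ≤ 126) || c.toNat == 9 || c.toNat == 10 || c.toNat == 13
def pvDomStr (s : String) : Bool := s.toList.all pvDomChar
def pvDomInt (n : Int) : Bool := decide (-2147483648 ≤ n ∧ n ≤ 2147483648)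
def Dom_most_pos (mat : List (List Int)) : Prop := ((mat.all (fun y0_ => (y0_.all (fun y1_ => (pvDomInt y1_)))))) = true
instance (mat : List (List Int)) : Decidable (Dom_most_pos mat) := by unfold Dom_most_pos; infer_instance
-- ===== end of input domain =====

-- B replaces A's single-pass running-max tracker by a stable sort of the row indices on descending positive-count, taking the first index (objective: alternative; same result incl. first-max tie-break).


-- ===== PORT A =====
-- state st = (big, i_max); mat[r] is always in range, ported as pyGetD with default []
def most_pos (mat : List (List Int)) : Int :=
  ((PySem.List.pyRange 0 (PySem.List.len mat) 1).foldl
    (fun (st : Int × Int) r =>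
      let counter := (PySem.List.pyGetD mat r []).foldl
        (fun counter c => if c > 0 then counter + 1 else counter) (0 : Int)
      if counter > st.2 then (r, counter) else st)
    ((0 : Int), (0 : Int))).1

-- ===== PORT B =====
-- sorted(range(len(mat)), key=…) with key r = -sum(1 for x in mat[r] if x > 0) (the 0/1-sum IS countP),
-- then order[0]; order is nonempty behind the guard, so [0] is ported as headD.
def most_pos_alt (mat : List (List Int)) : Int :=
  if mat = [] then 0
  else
    (PySem.List.sorted (PySem.List.pyRange 0 (PySem.List.len mat) 1)
      (fun r => -(((PySem.List.pyGetD mat r []).countP (fun x => 0 < x) : Nat) : Int))).headD 0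

-- ===== PRECONDITION & SPEC =====
def Spec_most_pos (mat : List (List Int)) (out : Int) : Prop := out = most_pos_alt mat
instance (mat : List (List Int)) (out : Int) : Decidable (Spec_most_pos mat out) := by unfold Spec_most_pos; infer_instance

-- ===== CLAIM (what is proved, stated in full; the proofs are below) =====
def Claim_equal_most_pos : Prop := ∀ (mat : List (List Int)), Dom_most_pos mat → Spec_most_pos mat (most_pos mat)

-- ===== LEMMAS AND PROOFS =====

/-- The positive count of row `r`, shared by both sides of the proof. -/
abbrev pvCnt (mat : List (List Int)) (r : Int) : Int :=
  (((PySem.List.pyGetD mat r []).countP (fun x => 0 < x) : Nat) : Int)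

/-- A's inner counting loop is a countP. -/
theorem counter_eq_countP (row : List Int) : ∀ (a : Int),
    row.foldl (fun counter c => if c > 0 then counter + 1 else counter) a
      = a + (row.countP (fun x => 0 < x) : Nat) := by
  induction row with
  | nil => intro a; simp
  | cons c cs ih =>
    intro a
    simp only [List.foldl_cons, List.countP_cons, ih]
    by_cases h : 0 < c
    · simp [h]; omega
    · simp [h]

/-- A's fold, once the state has the shape `(b, cnt b)`, is the first-argmax fold. -/
theorem loopA_fst (cnt : Int → Int) : ∀ (l : List Int) (b : Int),
    (l.foldl (fun (st : Int × Int) r => if cnt r > st.2 then (r, cnt r) else st) (b, cnt b)).1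
      = l.foldl (fun b r => if cnt r > cnt b then r else b) b := by
  intro l
  induction l with
  | nil => intro b; rfl
  | cons r t ih =>
    intro b
    simp only [List.foldl_cons]
    by_cases h : cnt r > cnt b
    · rw [if_pos h, if_pos h]; exact ih r
    · rw [if_neg h, if_neg h]; exact ih b

/-- The head of the insertion-sort fold (with strict `<` comparisons) is the first-argmin fold. -/
theorem foldl_insertBy_head (key : Int → Int) : ∀ (l : List Int) (m : Int) (acc : List Int),
    ∃ acc', l.foldl (fun acc x => PySem.List.insertBy (fun a b => decide (key a < key b)) x acc) (m :: acc)
      = (l.foldl (fun m x => if key x < key m then x else m) m) :: acc' := by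
  intro l
  induction l with
  | nil => intro m acc; exact ⟨acc, rfl⟩
  | cons x t ih =>
    intro m acc
    simp only [List.foldl_cons, PySem.List.insertBy]
    by_cases h : key x < key m
    · rw [if_pos (by simpa using h), if_pos h]
      exact ih x (m :: acc)
    · rw [if_neg (by simpa using h), if_neg h]
      exact ih m _

-- ===== VERDICT (by name: the statement is the Claim_ definition above) =====
theorem most_pos_spec : Claim_equal_most_pos := by
  intro mat _
  unfold Spec_most_pos most_pos most_pos_alt
  cases mat with
  | nil => simp [PySem.List.len, PySem.List.pyRange]
  | cons r0 rest =>
    rw [if_neg (List.cons_ne_nil r0 rest)]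
    set mat := r0 :: rest with hmat
    have hn : (0 : Int) < PySem.List.len mat := by
      simp [PySem.List.len, hmat]
    -- A's fold body computes pvCnt
    have hbody : (fun (st : Int × Int) r =>
        let counter := (PySem.List.pyGetD mat r []).foldl
          (fun counter c => if c > 0 then counter + 1 else counter) (0 : Int)
        if counter > st.2 then (r, counter) else st)
        = fun (st : Int × Int) r => if pvCnt mat r > st.2 then (r, pvCnt mat r) else st := by
      funext st r
      simp only [counter_eq_countP, pvCnt]
      norm_num
    rw [hbody, PySem.List.pyRange_one_cons hn]
    simp only [List.foldl_cons]
    -- first iteration yields the state (0, pvCnt mat 0)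
    have hnn : 0 ≤ pvCnt mat 0 := by unfold pvCnt; positivity
    have hfirst : (if pvCnt mat 0 > (0 : Int) then ((0 : Int), pvCnt mat 0) else ((0 : Int), (0 : Int)))
        = ((0 : Int), pvCnt mat 0) := by
      split_ifs with h
      · rfl
      · have h0 : pvCnt mat 0 = 0 := by omega
        rw [h0]
    rw [hfirst, loopA_fst (pvCnt mat)]
    -- B's side: head of the insertion sort
    rw [PySem.List.sorted_eq_foldl_insertBy]
    simp only [List.foldl_cons, PySem.List.insertBy]
    obtain ⟨acc', hacc⟩ := foldl_insertBy_head (fun r => -pvCnt mat r)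
      (PySem.List.pyRange (0 + 1) (PySem.List.len mat)) 0 []
    simp only [pvCnt] at hacc ⊢
    simp only [hacc, List.headD_cons]
    -- the two folds agree pointwise: cnt r > cnt b ↔ -cnt r < -cnt b
    congr 1
    funext b r
    by_cases h : pvCnt mat r > pvCnt mat b
    · simp only [pvCnt] at h
      rw [if_pos h, if_pos (by omega)]
    · simp only [pvCnt] at h
      rw [if_neg h, if_neg (by omega)]
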